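-- pv_equiv track=rewrite | github.com/Olixuta/Ramsey-Graphe | Ramsey PADOVAN Dorian.py | decimal_vers_binaire
-- ===== SOURCE A (Python) =====
-- def decimal_vers_binaire(p,n):
--     """converti un nombre en binaire
--
--     Args:
--         p (int=>0):un entier naturel sous base 10
--         n (int=>0): un entier naturel sous base 10
--
--     Returns:
--         liste: représentant l'écriture en base 2 du nombre p.La liste est taille n sauf si la représentation de p en base 2 est plus longue que n
--     """
--     c=[]
--     while p!=0:
--         c.insert(0,p%2)
--         p=p//2
--     n2=len(c)
--     for i in range(n-n2):
--         c.insert(0,0)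
--     return c
-- ===== SOURCE B (Python) =====
-- def decimal_vers_binaire(p, n):
--     L = max(n, p.bit_length())
--     return [(p >> (L - 1 - i)) & 1 for i in range(L)]
-- ===== Notes on version B (the rewrite author's own statement) =====
-- stated objective: faster
-- what changed: Replaces the running-quotient while-loop with repeated insert(0,...) (quadratic) and a separate zero-padding loop by a single MSB-first comprehension that reads each bit directly with a shift, using L = max(n, p.bit_length()).
import Mathlib
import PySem

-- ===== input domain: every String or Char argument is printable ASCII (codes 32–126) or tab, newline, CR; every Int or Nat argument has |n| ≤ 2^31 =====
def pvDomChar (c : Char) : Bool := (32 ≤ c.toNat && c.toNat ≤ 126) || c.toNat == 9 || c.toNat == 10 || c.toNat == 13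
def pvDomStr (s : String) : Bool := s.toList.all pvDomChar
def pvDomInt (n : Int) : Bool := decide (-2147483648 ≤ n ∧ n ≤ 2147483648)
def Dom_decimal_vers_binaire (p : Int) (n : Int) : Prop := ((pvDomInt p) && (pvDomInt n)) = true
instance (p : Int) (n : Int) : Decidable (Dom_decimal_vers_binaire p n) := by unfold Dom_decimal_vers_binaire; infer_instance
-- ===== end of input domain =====

-- B replaces A's running-quotient while-loop (insert(0, p%2); p //= 2) plus a zero-padding
-- loop by a single MSB-first comprehension reading each bit with a shift: simpler decomposition.


-- ===== PORT A =====
-- the 'while p != 0' loop; the '0 < p' guard only makes it total (Python diverges for p < 0,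
-- excluded by Pre_)
def pvBinLoopA (p : Int) (c : List Int) : List Int :=
  if 0 < p then pvBinLoopA (PySem.Int.floordiv p 2) (PySem.Int.mod p 2 :: c) else c
termination_by p.toNat
decreasing_by
  rw [PySem.Int.floordiv_eq_ediv_of_pos (by omega : (0:Int) < 2)]
  omega

def decimal_vers_binaire (p : Int) (n : Int) : List Int :=
  let c := pvBinLoopA p []
  let n2 : Int := c.length
  (PySem.List.pyRange 0 (n - n2) 1).foldl (fun acc _ => (0 : Int) :: acc) c

-- ===== PORT B =====
def decimal_vers_binaire_alt (p : Int) (n : Int) : List Int :=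
  let L : Int := max n (PySem.Int.bitLength p : Int)
  (PySem.List.pyRange 0 L 1).map (fun i => PySem.Int.band (p >>> (L - 1 - i).toNat) 1)

-- ===== PRECONDITION & SPEC =====
-- Pre_ excludes p < 0, on which Python A loops forever (p//2 never reaches 0).
def Pre_decimal_vers_binaire (p : Int) (n : Int) : Prop := 0 ≤ p
instance (p : Int) (n : Int) : Decidable (Pre_decimal_vers_binaire p n) := by unfold Pre_decimal_vers_binaire; infer_instance
def pvWitness_decimal_vers_binaire : Int × Int := (13, 6)
def Spec_decimal_vers_binaire (p : Int) (n : Int) (out : List Int) : Prop := out = decimal_vers_binaire_alt p n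
instance (p : Int) (n : Int) (out : List Int) : Decidable (Spec_decimal_vers_binaire p n out) := by unfold Spec_decimal_vers_binaire; infer_instance

-- ===== CLAIM (what is proved, stated in full; the proofs are below) =====
def Claim_equal_decimal_vers_binaire : Prop := ∀ (p : Int) (n : Int), Dom_decimal_vers_binaire p n → Pre_decimal_vers_binaire p n → Spec_decimal_vers_binaire p n (decimal_vers_binaire p n)

-- ===== LEMMAS AND PROOFS =====

-- MSB-first binary digits of a natural number (proof-side characterisation of A's loop)
def pvNatBits (k : Nat) : List Int :=
  if k = 0 then [] else pvNatBits (k / 2) ++ [((k % 2 : Nat) : Int)]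
decreasing_by omega

lemma pvBinLoopA_eq (k : Nat) (c : List Int) :
    pvBinLoopA (k : Int) c = pvNatBits k ++ c := by
  induction k using Nat.strong_induction_on generalizing c with
  | _ k ih =>
    rw [pvBinLoopA, pvNatBits]
    by_cases h : k = 0
    · simp [h]
    · have hk : (0 : Int) < (k : Int) := by omega
      rw [if_pos hk, if_neg h]
      rw [PySem.Int.floordiv_eq_ediv_of_pos (by omega : (0:Int) < 2),
          PySem.Int.mod_eq_emod_of_pos (by omega : (0:Int) < 2)]
      have h1 : ((k : Int)) / 2 = ((k / 2 : Nat) : Int) := by omega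
      have h2 : ((k : Int)) % 2 = ((k % 2 : Nat) : Int) := by omega
      rw [h1, h2, ih (k / 2) (by omega)]
      simp

lemma pvNatBits_length (k : Nat) :
    (pvNatBits k).length = PySem.Int.bitLength (k : Int) := by
  induction k using Nat.strong_induction_on with
  | _ k ih =>
    rw [pvNatBits]
    by_cases h : k = 0
    · simp [h, PySem.Int.bitLength_zero]
    · rw [if_neg h, PySem.Int.bitLength_natCast (show 0 < k by omega)]
      simp [ih (k / 2) (by omega)]

lemma pvShift_cast (k t : Nat) : ((k : Int) >>> t) = ((k >>> t : Nat) : Int) := rfl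

-- map characterisation of pvNatBits
lemma pvNatBits_map (k : Nat) :
    pvNatBits k =
      (List.range (PySem.Int.bitLength (k : Int))).map
        (fun i => (((k >>> (PySem.Int.bitLength (k : Int) - 1 - i)) % 2 : Nat) : Int)) := by
  induction k using Nat.strong_induction_on with
  | _ k ih =>
    rw [pvNatBits]
    by_cases h : k = 0
    · simp [h, PySem.Int.bitLength_zero]
    · rw [if_neg h, PySem.Int.bitLength_natCast (show 0 < k by omega)]
      set s := PySem.Int.bitLength ((k / 2 : Nat) : Int) with hs
      rw [List.range_succ, List.map_append, ih (k / 2) (by omega), ← hs]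
      congr 1
      · apply List.map_congr_left
        intro i hi
        rw [List.mem_range] at hi
        congr 1
        have h1 : s + 1 - 1 - i = (s - 1 - i) + 1 := by omega
        rw [h1]
        have : k >>> (s - 1 - i + 1) = (k / 2) >>> (s - 1 - i) := by
          simp [Nat.shiftRight_eq_div_pow, Nat.div_div_eq_div_mul, pow_succ, Nat.mul_comm]
        rw [this]
      · simp

lemma pvFoldl_prepend_zero (l : List Int) (c : List Int) :
    l.foldl (fun acc (_ : Int) => (0 : Int) :: acc) c = List.replicate l.length 0 ++ c := by
  induction l generalizing c with
  | nil => simp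
  | cons x xs ih =>
    simp only [List.foldl_cons, ih, List.length_cons]
    rw [List.replicate_succ']
    simp

lemma pvHighBit_zero (k t : Nat) (h : PySem.Int.bitLength (k : Int) ≤ t) : k >>> t = 0 := by
  have hlt : k < 2 ^ PySem.Int.bitLength (k : Int) := by
    have := PySem.Int.lt_two_pow_bitLength (k : Int)
    simpa using this
  rw [Nat.shiftRight_eq_div_pow]
  exact Nat.div_eq_zero_iff.mpr (Or.inr (lt_of_lt_of_le hlt (Nat.pow_le_pow_right (by omega) h)))

-- ===== VERDICT (by name: the statement is the Claim_ definition above) =====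
theorem decimal_vers_binaire_spec : Claim_equal_decimal_vers_binaire := by
  intro p n _ hp
  have hp0 : 0 ≤ p := hp
  unfold Spec_decimal_vers_binaire decimal_vers_binaire decimal_vers_binaire_alt
  obtain ⟨k, rfl⟩ : ∃ k : Nat, p = (k : Int) := ⟨p.toNat, by omega⟩
  set s : Nat := PySem.Int.bitLength (k : Int) with hs
  simp only [pvBinLoopA_eq, List.append_nil, pvFoldl_prepend_zero,
    PySem.List.length_pyRange_one, pvNatBits_length, ← hs]
  rw [PySem.List.pyRange_one]
  have hL : (max n (s : Int) - 0).toNat = (n - (s : Int) - 0).toNat + s := by omega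
  rw [hL, List.range_add]
  simp only [List.map_append, List.map_map]
  congr 1
  · -- padding part: every shift is ≥ s, so the bit is 0
    symm
    rw [List.eq_replicate_iff]
    refine ⟨by simp, ?_⟩
    intro b hb
    simp only [List.mem_map, List.mem_range] at hb
    obtain ⟨i, hi, rfl⟩ := hb
    simp only [Function.comp]
    have ht : (max n (s : Int) - 1 - (0 + (i : Int))).toNat ≥ s := by omega
    rw [pvShift_cast, pvHighBit_zero k _ ht, PySem.Int.band_one,
      PySem.Int.mod_eq_emod_of_pos (by omega : (0:Int) < 2)]
    simp
  · -- digit part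
    rw [pvNatBits_map, ← hs]
    apply List.map_congr_left
    intro i hi
    rw [List.mem_range] at hi
    simp only [Function.comp]
    have harg : (max n (s : Int) - 1 - (0 + (((n - (s : Int) - 0).toNat + i : Nat) : Int))).toNat
        = s - 1 - i := by omega
    rw [harg, pvShift_cast, PySem.Int.band_one,
      PySem.Int.mod_eq_emod_of_pos (by omega : (0:Int) < 2)]
    omega
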